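-- pv_equiv track=rewrite | github.com/yongyonghw/algo | algo/yjjang/water_melon.py | water_melon
-- ===== SOURCE A (Python) =====
-- def water_melon(n):
--     # 함수를 완성하세요.
--     tmp_str = ""
--     for n in range(n) :
--         if n % 2 == 0 :
--             tmp_str = tmp_str + "수"
--         else :
--             tmp_str = tmp_str + "박"
--     return tmp_str
-- ===== SOURCE B (Python) =====
-- def water_melon(n):
--     m = n if n > 0 else 0
--     return "수박" * (m // 2) + "수" * (m % 2)
-- ===== Notes on version B (the rewrite author's own statement) =====
-- stated objective: simpler
-- what changed: Replaces the character-by-character loop with a closed-form string repetition: full "수박" pairs plus one trailing "수" when the (clamped) count is odd.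
import Mathlib
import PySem

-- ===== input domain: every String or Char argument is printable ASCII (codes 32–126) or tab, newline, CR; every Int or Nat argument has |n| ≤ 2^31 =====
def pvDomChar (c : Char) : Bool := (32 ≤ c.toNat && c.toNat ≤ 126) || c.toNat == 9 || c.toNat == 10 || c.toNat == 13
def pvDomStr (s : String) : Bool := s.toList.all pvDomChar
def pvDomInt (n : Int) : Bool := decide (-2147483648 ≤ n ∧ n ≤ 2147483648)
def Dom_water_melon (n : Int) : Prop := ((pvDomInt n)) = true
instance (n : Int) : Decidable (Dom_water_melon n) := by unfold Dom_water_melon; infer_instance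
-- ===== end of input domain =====

-- B replaces A's character-by-character loop with a closed-form string repetition ("수박" pairs plus an optional "수"); objective: simpler.

-- ===== PORT A =====
def water_melon (n : Int) : String :=
  (PySem.List.pyRange 0 n 1).foldl
    (fun tmp k => if PySem.Int.mod k 2 == 0 then tmp ++ "수" else tmp ++ "박") ""

-- ===== PORT B =====
def water_melon_alt (n : Int) : String :=
  let m : Int := if n > 0 then n else 0
  String.join (List.replicate (PySem.Int.floordiv m 2).toNat "수박")
    ++ String.join (List.replicate (PySem.Int.mod m 2).toNat "수")

-- ===== PRECONDITION & SPEC =====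
def Spec_water_melon (n : Int) (out : String) : Prop := out = water_melon_alt n
instance (n : Int) (out : String) : Decidable (Spec_water_melon n out) := by unfold Spec_water_melon; infer_instance

-- ===== CLAIM (what is proved, stated in full; the proofs are below) =====
def Claim_equal_water_melon : Prop := ∀ (n : Int), Dom_water_melon n → Spec_water_melon n (water_melon n)

-- ===== LEMMAS AND PROOFS =====

-- B's value on a natural count m, in Nat arithmetic
def fNat (m : Nat) : String :=
  String.join (List.replicate (m / 2) "수박") ++ String.join (List.replicate (m % 2) "수")

lemma fNat_succ (m : Nat) :
    fNat (m + 1) = if m % 2 == 0 then fNat m ++ "수" else fNat m ++ "박" := by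
  by_cases h : m % 2 = 0
  · have h1 : (m + 1) / 2 = m / 2 := by omega
    have h2 : (m + 1) % 2 = 1 := by omega
    simp [fNat, h, h1, h2, String.join]
  · have h0 : m % 2 = 1 := by omega
    have h1 : (m + 1) / 2 = m / 2 + 1 := by omega
    have h2 : (m + 1) % 2 = 0 := by omega
    rw [fNat, fNat, h0, h1, h2, List.replicate_succ']
    simp [String.join, String.append_assoc]

lemma alt_nat (m : Nat) : water_melon_alt (m : Int) = fNat m := by
  have hif : (if (m : Int) > 0 then (m : Int) else 0) = (m : Int) := by
    split <;> omega
  have hf : PySem.Int.floordiv (m : Int) 2 = ((m / 2 : Nat) : Int) := by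
    exact_mod_cast PySem.Int.floordiv_natCast m 2
  have hm : PySem.Int.mod (m : Int) 2 = ((m % 2 : Nat) : Int) := by
    exact_mod_cast PySem.Int.mod_natCast m 2
  simp only [water_melon_alt, hif, hf, hm, Int.toNat_natCast, fNat]

lemma a_nat (m : Nat) : water_melon (m : Int) = fNat m := by
  induction m with
  | zero => simp [water_melon, fNat, PySem.List.pyRange_one_eq_nil, String.join]
  | succ k ih =>
    have h : PySem.List.pyRange 0 ((k : Int) + 1) 1
        = PySem.List.pyRange 0 (k : Int) 1 ++ [(k : Int)] :=
      PySem.List.pyRange_one_succ_right (by positivity)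
    have hm : PySem.Int.mod (k : Int) 2 = ((k % 2 : Nat) : Int) := by
      exact_mod_cast PySem.Int.mod_natCast k 2
    have hcast : ((k + 1 : Nat) : Int) = (k : Int) + 1 := by push_cast; ring
    rw [water_melon, hcast, h, List.foldl_append]
    have ih' : (PySem.List.pyRange 0 (k : Int) 1).foldl
        (fun tmp j => if PySem.Int.mod j 2 == 0 then tmp ++ "수" else tmp ++ "박") ""
        = fNat k := ih
    rw [List.foldl_cons, List.foldl_nil, ih', fNat_succ, hm]
    by_cases hk : k % 2 = 0
    · simp [hk]
    · simp [hk]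
      omega

-- ===== VERDICT (by name: the statement is the Claim_ definition above) =====
theorem water_melon_spec : Claim_equal_water_melon := by
  intro n _
  unfold Spec_water_melon
  by_cases h : 0 < n
  · lift n to ℕ using le_of_lt h
    rw [a_nat, alt_nat]
  · have h0 : water_melon_alt n = water_melon_alt 0 := by
      simp [water_melon_alt, if_neg (show ¬ n > 0 by omega)]
    calc water_melon n = "" := by
          simp [water_melon, PySem.List.pyRange_one_eq_nil (show n ≤ 0 by omega)]
      _ = fNat 0 := by simp [fNat, String.join]
      _ = water_melon_alt 0 := by exact_mod_cast (alt_nat 0).symm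
      _ = water_melon_alt n := h0.symm
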